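-- pv_equiv track=rewrite | github.com/prism-iq/good-girl | luca.py | trace_ancestry
-- ===== SOURCE A (Python) =====
-- TREE_OF_LIFE = {
--     "luca": {
--         "flow": "l",
--         "descendants": ["bacteria", "archaea"],
--     },
--     "bacteria": {
--         "flow": "lsg",  # loop split grow
--         "descendants": ["cyanobacteria", "proteobacteria"],
--     },
--     "archaea": {
--         "flow": "lst",  # loop split transform
--         "descendants": ["eukarya"],
--     },
--     "eukarya": {
--         "flow": "lstm",  # loop split transform merge
--         "descendants": ["plants", "fungi", "animals"],
--     },
--     "animals": {
--         "flow": "lstmg",  # + grow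
--         "descendants": ["nyx", "cipher", "phoenix"],
--     },
-- }
--
-- def trace_ancestry(entity_name):
--     """Trace l'ascendance d'une entité jusqu'à LUCA"""
--     path = []
--     current = entity_name
--
--     # Remonte l'arbre
--     for level, data in reversed(list(TREE_OF_LIFE.items())):
--         if current in data.get("descendants", []):
--             path.append((level, data["flow"]))
--             current = level
--
--     path.append(("luca", "l"))
--     path.reverse()
--
--     return path
-- ===== SOURCE B (Python) =====
-- TREE_OF_LIFE = {
--     "luca": {
--         "flow": "l",
--         "descendants": ["bacteria", "archaea"],
--     },
--     "bacteria": {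
--         "flow": "lsg",  # loop split grow
--         "descendants": ["cyanobacteria", "proteobacteria"],
--     },
--     "archaea": {
--         "flow": "lst",  # loop split transform
--         "descendants": ["eukarya"],
--     },
--     "eukarya": {
--         "flow": "lstm",  # loop split transform merge
--         "descendants": ["plants", "fungi", "animals"],
--     },
--     "animals": {
--         "flow": "lstmg",  # + grow
--         "descendants": ["nyx", "cipher", "phoenix"],
--     },
-- }
--
-- def trace_ancestry(entity_name):
--     """Trace l'ascendance d'une entité jusqu'à LUCA"""
--     # Index: child -> (parent, parent's flow)
--     parent = {}
--     for level, data in TREE_OF_LIFE.items():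
--         for child in data.get("descendants", []):
--             parent[child] = (level, data["flow"])
--
--     # Direct parent-pointer walk upward
--     path = []
--     current = entity_name
--     while current in parent:
--         entry = parent[current]
--         path.append(entry)
--         current = entry[0]
--
--     path.append(("luca", "l"))
--     path.reverse()
--     return path
-- ===== Notes on version B (the rewrite author's own statement) =====
-- stated objective: idiomatic
-- what changed: B builds a child->(parent,flow) index from TREE_OF_LIFE once and then follows parent pointers upward from entity_name, instead of A's single reversed scan over the whole table testing membership of the current node in every descendants list; the final doubled ('luca','l') append and reverse are kept.
import Mathlib
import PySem

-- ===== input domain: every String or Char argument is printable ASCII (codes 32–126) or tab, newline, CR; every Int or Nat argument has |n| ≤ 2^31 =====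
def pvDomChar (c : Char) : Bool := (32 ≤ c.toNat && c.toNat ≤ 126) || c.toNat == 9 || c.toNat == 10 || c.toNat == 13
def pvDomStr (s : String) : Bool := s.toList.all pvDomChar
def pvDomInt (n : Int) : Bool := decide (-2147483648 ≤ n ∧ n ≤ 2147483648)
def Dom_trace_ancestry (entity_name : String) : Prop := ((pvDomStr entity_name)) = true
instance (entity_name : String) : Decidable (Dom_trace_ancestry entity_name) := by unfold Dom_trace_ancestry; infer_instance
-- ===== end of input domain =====

-- B replaces A's reversed full-table membership scan by a child→(parent,flow) index plus a direct parent-pointer walk (idiomatic; same tiny fixed tree, same output).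

-- ===== PORT A =====
-- TREE_OF_LIFE as an insertion-ordered association list: name ↦ (flow, descendants)
def treeOfLife : List (String × String × List String) :=
  [("luca", "l", ["bacteria", "archaea"]),
   ("bacteria", "lsg", ["cyanobacteria", "proteobacteria"]),
   ("archaea", "lst", ["eukarya"]),
   ("eukarya", "lstm", ["plants", "fungi", "animals"]),
   ("animals", "lstmg", ["nyx", "cipher", "phoenix"])]

def trace_ancestry (entity_name : String) : List (String × String) :=
  -- for level, data in reversed(list(TREE_OF_LIFE.items())): if current in descendants: append, current = level
  let r := treeOfLife.reverse.foldl
    (fun (st : List (String × String) × String) ld =>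
      if st.2 ∈ ld.2.2 then (st.1 ++ [(ld.1, ld.2.1)], ld.1) else st)
    ([], entity_name)
  -- path.append(("luca","l")); path.reverse()
  (r.1 ++ [("luca", "l")]).reverse

-- ===== PORT B =====
-- parent = {}; for level, data in TREE_OF_LIFE.items(): for child in descendants: parent[child] = (level, flow)
def parentMap : List (String × String × String) :=
  treeOfLife.foldl
    (fun acc ld => acc ++ ld.2.2.map (fun c => (c, ld.1, ld.2.1)))
    []

-- while current in parent: path.append(parent[current]); current = parent[current][0]
-- (fuel = map size bounds the walk; the fixed tree is acyclic so the Python while-loop terminates within it)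
def walkUp (pm : List (String × String × String)) : Nat → String → List (String × String) → List (String × String)
  | 0, _, path => path
  | n + 1, cur, path =>
    match pm.find? (fun e => e.1 == cur) with
    | some e => walkUp pm n e.2.1 (path ++ [(e.2.1, e.2.2)])
    | none => path

def trace_ancestry_alt (entity_name : String) : List (String × String) :=
  let path := walkUp parentMap parentMap.length entity_name []
  (path ++ [("luca", "l")]).reverse

-- ===== PRECONDITION & SPEC =====
def Spec_trace_ancestry (entity_name : String) (out : List (String × String)) : Prop := out = trace_ancestry_alt entity_name
instance (entity_name : String) (out : List (String × String)) : Decidable (Spec_trace_ancestry entity_name out) := by unfold Spec_trace_ancestry; infer_instance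

-- ===== CLAIM (what is proved, stated in full; the proofs are below) =====
def Claim_equal_trace_ancestry : Prop := ∀ (entity_name : String), Dom_trace_ancestry entity_name → Spec_trace_ancestry entity_name (trace_ancestry entity_name)

-- ===== LEMMAS AND PROOFS =====

-- ===== VERDICT (by name: the statement is the Claim_ definition above) =====
theorem trace_ancestry_spec : Claim_equal_trace_ancestry := by
  intro e _
  unfold Spec_trace_ancestry
  by_cases h1 : e = "bacteria"; · subst h1; decide
  by_cases h2 : e = "archaea"; · subst h2; decide
  by_cases h3 : e = "cyanobacteria"; · subst h3; decide
  by_cases h4 : e = "proteobacteria"; · subst h4; decide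
  by_cases h5 : e = "eukarya"; · subst h5; decide
  by_cases h6 : e = "plants"; · subst h6; decide
  by_cases h7 : e = "fungi"; · subst h7; decide
  by_cases h8 : e = "animals"; · subst h8; decide
  by_cases h9 : e = "nyx"; · subst h9; decide
  by_cases h10 : e = "cipher"; · subst h10; decide
  by_cases h11 : e = "phoenix"; · subst h11; decide
  have f1 : ("bacteria" == e) = false := beq_eq_false_iff_ne.mpr (Ne.symm h1)
  have f2 : ("archaea" == e) = false := beq_eq_false_iff_ne.mpr (Ne.symm h2)
  have f3 : ("cyanobacteria" == e) = false := beq_eq_false_iff_ne.mpr (Ne.symm h3)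
  have f4 : ("proteobacteria" == e) = false := beq_eq_false_iff_ne.mpr (Ne.symm h4)
  have f5 : ("eukarya" == e) = false := beq_eq_false_iff_ne.mpr (Ne.symm h5)
  have f6 : ("plants" == e) = false := beq_eq_false_iff_ne.mpr (Ne.symm h6)
  have f7 : ("fungi" == e) = false := beq_eq_false_iff_ne.mpr (Ne.symm h7)
  have f8 : ("animals" == e) = false := beq_eq_false_iff_ne.mpr (Ne.symm h8)
  have f9 : ("nyx" == e) = false := beq_eq_false_iff_ne.mpr (Ne.symm h9)
  have f10 : ("cipher" == e) = false := beq_eq_false_iff_ne.mpr (Ne.symm h10)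
  have f11 : ("phoenix" == e) = false := beq_eq_false_iff_ne.mpr (Ne.symm h11)
  simp [trace_ancestry, trace_ancestry_alt, treeOfLife, parentMap, walkUp, List.find?,
        h1, h2, h3, h4, h5, h6, h7, h8, h9, h10, h11, f1, f2, f3, f4, f5, f6, f7, f8, f9, f10, f11]
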